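-- pv_equiv track=rewrite | github.com/NathanZabriskie/neat_py | plot_species.py | process_generation
-- ===== SOURCE A (Python) =====
-- def process_generation(distribution, generation):
--     num_genomes = 0
--     num_species = 0
--
--     for l in distribution.values():
--         if l[generation] != 0:
--             num_genomes += l[generation]
--             num_species += 1
--
--     return num_genomes, num_species
-- ===== SOURCE B (Python) =====
-- def process_generation(distribution, generation):
--     col = [l[generation] for l in distribution.values()]
--     return sum(col), len(col) - col.count(0)
-- ===== Notes on version B (the rewrite author's own statement) =====
-- stated objective: alternative
-- what changed: Instead of one loop that conditionally accumulates both counters under a nonzero test, B materializes the generation column once and derives both results arithmetically: the sum needs no filter (zeros add nothing), and the species count is computed by complement as len(col) - col.count(0), with no nonzero branch anywhere.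
import Mathlib
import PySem

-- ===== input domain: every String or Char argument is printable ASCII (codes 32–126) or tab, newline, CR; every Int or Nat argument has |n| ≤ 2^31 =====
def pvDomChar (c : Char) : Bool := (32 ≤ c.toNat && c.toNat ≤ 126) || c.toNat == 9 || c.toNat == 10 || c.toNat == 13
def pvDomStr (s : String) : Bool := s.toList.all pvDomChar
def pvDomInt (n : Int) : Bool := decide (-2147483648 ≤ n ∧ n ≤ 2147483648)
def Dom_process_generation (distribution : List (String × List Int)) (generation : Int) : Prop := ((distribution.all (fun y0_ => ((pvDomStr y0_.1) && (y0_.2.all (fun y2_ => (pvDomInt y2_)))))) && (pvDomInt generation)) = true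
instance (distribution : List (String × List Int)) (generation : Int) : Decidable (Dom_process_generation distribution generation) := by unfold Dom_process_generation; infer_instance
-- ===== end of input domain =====

-- B extracts the generation column once, sums it unfiltered (zeros add nothing) and
-- counts species by complement: total entries minus the count of zeros — no nonzero branch.

-- ===== PORT A =====
def process_generation (distribution : List (String × List Int)) (generation : Int) : Int × Int :=
  distribution.foldl
    (fun (acc : Int × Int) p =>
      if PySem.List.pyGetD p.2 generation 0 ≠ 0 then
        (acc.1 + PySem.List.pyGetD p.2 generation 0, acc.2 + 1)
      else acc)
    (0, 0)

-- ===== PORT B =====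
def process_generation_alt (distribution : List (String × List Int)) (generation : Int) : Int × Int :=
  let col := distribution.map (fun p => PySem.List.pyGetD p.2 generation 0)
  (col.sum, (col.length : Int) - (PySem.List.count col 0 : Int))

-- ===== PRECONDITION & SPEC =====
-- Exactly the inputs where Python A returns: generation is a valid index into every value list (else IndexError).
def Pre_process_generation (distribution : List (String × List Int)) (generation : Int) : Prop :=
  ∀ p ∈ distribution, PySem.Raise.InRange p.2.length generation
instance (distribution : List (String × List Int)) (generation : Int) : Decidable (Pre_process_generation distribution generation) := by unfold Pre_process_generation; infer_instance

def pvWitness_process_generation : (List (String × List Int)) × Int :=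
  ([("a", [1, 2]), ("b", [0, 3])], 1)

def Spec_process_generation (distribution : List (String × List Int)) (generation : Int) (out : Int × Int) : Prop := out = process_generation_alt distribution generation
instance (distribution : List (String × List Int)) (generation : Int) (out : Int × Int) : Decidable (Spec_process_generation distribution generation out) := by unfold Spec_process_generation; infer_instance

-- ===== CLAIM (what is proved, stated in full; the proofs are below) =====
def Claim_equal_process_generation : Prop := ∀ (distribution : List (String × List Int)) (generation : Int), Dom_process_generation distribution generation → Pre_process_generation distribution generation → Spec_process_generation distribution generation (process_generation distribution generation)

-- ===== LEMMAS AND PROOFS =====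
theorem pg_foldl_char (generation : Int) (distribution : List (String × List Int)) (a b : Int) :
    distribution.foldl
      (fun (acc : Int × Int) p =>
        if PySem.List.pyGetD p.2 generation 0 ≠ 0 then
          (acc.1 + PySem.List.pyGetD p.2 generation 0, acc.2 + 1)
        else acc)
      (a, b)
    = (a + (distribution.map (fun p => PySem.List.pyGetD p.2 generation 0)).sum,
       b + (distribution.length : Int)
         - (PySem.List.count (distribution.map (fun p => PySem.List.pyGetD p.2 generation 0)) 0 : Int)) := by
  induction distribution generalizing a b with
  | nil => simp [PySem.List.count]
  | cons h t ih =>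
    rw [List.foldl_cons]
    by_cases hv : PySem.List.pyGetD h.2 generation 0 = 0
    · rw [if_neg (by simp [hv]), ih]
      refine Prod.ext ?_ ?_ <;> simp [PySem.List.count, List.count_cons, hv] <;> push_cast <;> ring
    · rw [if_pos hv, ih]
      refine Prod.ext ?_ ?_ <;> simp [PySem.List.count, List.count_cons, hv] <;> push_cast <;> ring

-- ===== VERDICT (by name: the statement is the Claim_ definition above) =====
theorem process_generation_spec : Claim_equal_process_generation := by
  intro distribution generation _ _
  unfold Spec_process_generation process_generation process_generation_alt
  rw [pg_foldl_char]
  simp
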